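-- pv_equiv track=rewrite | github.com/nwalton125/expanders | magicalECCS.py | suff_small_sublists
-- ===== SOURCE A (Python) =====
-- def suff_small_sublists(l, k):
-- 	if k < 0:
-- 		return []
-- 	elif l == [] or k == 0:
-- 		return [[]]
-- 	smaller_sublists = suff_small_sublists(l[1:], k)
-- 	all_sublists = []
-- 	for s in smaller_sublists:
-- 		all_sublists.append(s)
-- 		if len(s) < k:
-- 			all_sublists.append([l[0]] + s)
-- 	return all_sublists
-- ===== SOURCE B (Python) =====
-- def suff_small_sublists(l, k):
--     if k < 0:
--         return []
--     result = [[]]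
--     for elem in reversed(l):
--         result = [t for s in result
--                     for t in ([s, [elem] + s] if len(s) < k else [s])]
--     return result
-- ===== Notes on version B (the rewrite author's own statement) =====
-- stated objective: simpler
-- what changed: Replaces the top-down recursion with an iterative bottom-up fold over reversed(l) that rebuilds the result via a flat comprehension, removing recursion and the repeated l[1:] slicing.
import Mathlib
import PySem

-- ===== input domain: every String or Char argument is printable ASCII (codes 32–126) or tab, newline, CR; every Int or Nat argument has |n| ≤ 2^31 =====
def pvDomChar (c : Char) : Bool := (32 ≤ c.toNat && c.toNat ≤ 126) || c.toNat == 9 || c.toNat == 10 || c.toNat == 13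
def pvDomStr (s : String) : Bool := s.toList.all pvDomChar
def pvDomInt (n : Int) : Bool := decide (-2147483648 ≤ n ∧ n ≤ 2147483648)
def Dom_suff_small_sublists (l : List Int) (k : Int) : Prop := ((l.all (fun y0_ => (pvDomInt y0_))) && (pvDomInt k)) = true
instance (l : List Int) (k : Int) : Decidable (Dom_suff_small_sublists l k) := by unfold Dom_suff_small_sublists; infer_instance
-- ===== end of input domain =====

-- B replaces the top-down recursion with an iterative bottom-up fold over reversed(l)
-- using a flat comprehension — simpler: no recursion, no repeated slicing.


-- ===== PORT A =====
-- literal transliteration of A's recursion; l[1:] is the tail, l[0] the head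
def suff_small_sublists (l : List Int) (k : Int) : List (List Int) :=
  if k < 0 then []
  else if l = [] ∨ k = 0 then [[]]
  else
    match l with
    | [] => [[]]  -- unreachable (l = [] handled above)
    | x :: rest =>
      let smaller_sublists := suff_small_sublists rest k
      smaller_sublists.foldl
        (fun all_sublists s =>
          (all_sublists ++ [s]) ++ (if (s.length : Int) < k then [x :: s] else []))
        []

-- ===== PORT B =====
def suff_small_sublists_alt (l : List Int) (k : Int) : List (List Int) :=
  if k < 0 then []
  else
    l.reverse.foldl
      (fun result elem =>
        result.flatMap (fun s => if (s.length : Int) < k then [s, elem :: s] else [s]))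
      [[]]

-- ===== PRECONDITION & SPEC =====
def Spec_suff_small_sublists (l : List Int) (k : Int) (out : List (List Int)) : Prop := out = suff_small_sublists_alt l k
instance (l : List Int) (k : Int) (out : List (List Int)) : Decidable (Spec_suff_small_sublists l k out) := by unfold Spec_suff_small_sublists; infer_instance

-- ===== CLAIM (what is proved, stated in full; the proofs are below) =====
def Claim_equal_suff_small_sublists : Prop := ∀ (l : List Int) (k : Int), Dom_suff_small_sublists l k → Spec_suff_small_sublists l k (suff_small_sublists l k)

-- ===== LEMMAS AND PROOFS =====

-- one step of B's loop
def pvStep (k : Int) (result : List (List Int)) (elem : Int) : List (List Int) :=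
  result.flatMap (fun s => if (s.length : Int) < k then [s, elem :: s] else [s])

theorem alt_nil (k : Int) (h : ¬ k < 0) : suff_small_sublists_alt [] k = [[]] := by
  simp [suff_small_sublists_alt, h]

theorem alt_cons (x : Int) (rest : List Int) (k : Int) (h : ¬ k < 0) :
    suff_small_sublists_alt (x :: rest) k = pvStep k (suff_small_sublists_alt rest k) x := by
  simp [suff_small_sublists_alt, h, pvStep, List.foldl_append]

theorem step_nil_mem (k : Int) (hk : k = 0) (r : List (List Int)) (x : Int) :
    pvStep k r x = r := by
  subst hk
  unfold pvStep
  rw [show (fun s : List Int => if ((s.length : Int) < 0) then [s, x :: s] else [s])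
        = fun s => [s] from funext fun s => if_neg (by omega)]
  exact List.flatMap_singleton' r

-- A's inner loop equals B's flatMap step
theorem inner_eq (k : Int) (x : Int) (r : List (List Int)) :
    r.foldl (fun all_sublists s =>
        (all_sublists ++ [s]) ++ (if (s.length : Int) < k then [x :: s] else [])) []
      = pvStep k r x := by
  have h := PySem.List.foldl_append_eq_flatMap
      (l := r) (acc := ([] : List (List Int)))
      (g := fun s => ([s] ++ (if (s.length : Int) < k then [x :: s] else [])))
  simp only [List.append_assoc]
  rw [h]
  simp only [List.nil_append, pvStep]
  congr 1
  funext s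
  split <;> rfl

theorem alt_k0 (l : List Int) : suff_small_sublists_alt l 0 = [[]] := by
  induction l with
  | nil => exact alt_nil 0 (by omega)
  | cons x rest ih => rw [alt_cons x rest 0 (by omega), ih, step_nil_mem 0 rfl]

theorem main_eq (l : List Int) (k : Int) :
    suff_small_sublists l k = suff_small_sublists_alt l k := by
  induction l with
  | nil =>
    by_cases h : k < 0
    · simp [suff_small_sublists, suff_small_sublists_alt, h]
    · simp [suff_small_sublists, alt_nil k h, h]
  | cons x rest ih =>
    by_cases h : k < 0
    · simp [suff_small_sublists, suff_small_sublists_alt, h]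
    · by_cases hk : k = 0
      · subst hk
        rw [alt_k0, suff_small_sublists]
        simp
      · rw [alt_cons x rest k h, suff_small_sublists]
        simp only [h, if_false]
        rw [if_neg (by simp [hk])]
        rw [inner_eq, ih]

-- ===== VERDICT (by name: the statement is the Claim_ definition above) =====
theorem suff_small_sublists_spec : Claim_equal_suff_small_sublists := by
  intro l k _
  unfold Spec_suff_small_sublists
  exact main_eq l k
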